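-- pv_equiv track=rewrite | github.com/lbreede/advent-of-code | 2019/day08.py | get_layer_by_count
-- ===== SOURCE A (Python) =====
-- def get_layer_by_count(lst, val):
--     val = str(val)
--     lowest_count = float("inf")
--     layer = -1
--     for i, x in enumerate(lst):
--         count = x.count(val)
--         if count < lowest_count:
--             lowest_count = count
--             layer = i
--     return layer
-- ===== SOURCE B (Python) =====
-- def get_layer_by_count(lst, val):
--     val = str(val)
--     order = sorted(enumerate(lst), key=lambda p: p[1].count(val))
--     return order[0][0] if order else -1
-- ===== Notes on version B (the rewrite author's own statement) =====
-- stated objective: alternative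
-- what changed: Replaces A's single-pass running-min tracking (lowest_count/layer state) with a stable sort of the (index, layer) pairs by count, returning the index of the head; stability makes ties resolve to the first index exactly as A's strict-< update does.
import Mathlib
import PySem

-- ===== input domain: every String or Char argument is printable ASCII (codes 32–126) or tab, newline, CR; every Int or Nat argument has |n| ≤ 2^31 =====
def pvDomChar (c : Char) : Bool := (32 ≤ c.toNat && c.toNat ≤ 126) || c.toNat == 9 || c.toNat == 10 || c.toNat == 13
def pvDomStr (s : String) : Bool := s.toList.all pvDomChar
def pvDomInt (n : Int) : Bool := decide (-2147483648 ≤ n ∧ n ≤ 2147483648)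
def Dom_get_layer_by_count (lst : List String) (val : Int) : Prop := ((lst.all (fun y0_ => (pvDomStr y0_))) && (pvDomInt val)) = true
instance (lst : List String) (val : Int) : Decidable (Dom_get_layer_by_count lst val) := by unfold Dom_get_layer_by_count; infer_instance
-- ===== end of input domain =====

-- B replaces A's single-pass running-min tracking by a stable sort of (index, layer) pairs by count, returning the head's index (objective: alternative).

-- ===== PORT A =====
-- literal port of A: running (lowest_count, layer) state over enumerate(lst); none plays float("inf")
def get_layer_by_count (lst : List String) (val : Int) : Int :=
  let v := PySem.Int.toStr val
  ((PySem.List.enumerate lst).foldl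
    (fun (st : Option Int × Int) (p : Int × String) =>
      let count : Int := (PySem.Str.count p.2 v : Int)
      match st.1 with
      | none => (some count, p.1)
      | some lc => if count < lc then (some count, p.1) else st)
    (none, -1)).2

-- ===== PORT B =====
-- literal port of B: order = sorted(enumerate(lst), key=lambda p: p[1].count(val)); order[0][0] if order else -1
def get_layer_by_count_alt (lst : List String) (val : Int) : Int :=
  let v := PySem.Int.toStr val
  let order := PySem.List.sorted (PySem.List.enumerate lst) (fun p => (PySem.Str.count p.2 v : Int)) false
  match order with
  | [] => -1
  | p :: _ => p.1

-- ===== PRECONDITION & SPEC =====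
def Spec_get_layer_by_count (lst : List String) (val : Int) (out : Int) : Prop := out = get_layer_by_count_alt lst val
instance (lst : List String) (val : Int) (out : Int) : Decidable (Spec_get_layer_by_count lst val out) := by unfold Spec_get_layer_by_count; infer_instance

-- ===== CLAIM (what is proved, stated in full; the proofs are below) =====
def Claim_equal_get_layer_by_count : Prop := ∀ (lst : List String) (val : Int), Dom_get_layer_by_count lst val → Spec_get_layer_by_count lst val (get_layer_by_count lst val)

-- ===== LEMMAS AND PROOFS =====

-- the common abstraction: the first key-minimal pair of the processed prefix (strict-< update)
def pvBest (key : Int × String → Int) (st : Option (Int × String)) (p : Int × String) : Option (Int × String) :=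
  match st with
  | none => some p
  | some m => if key p < key m then some p else some m

-- A's fold equals the pvBest fold (projected to the index, -1 when empty)
theorem pvAfold_eq_best (v : String) :
    ∀ (ps : List (Int × String)) (st : Option (Int × String)),
      (ps.foldl
        (fun (st : Option Int × Int) (p : Int × String) =>
          let count : Int := (PySem.Str.count p.2 v : Int)
          match st.1 with
          | none => (some count, p.1)
          | some lc => if count < lc then (some count, p.1) else st)
        (match st with
         | none => (none, -1)
         | some m => (some ((PySem.Str.count m.2 v : Int)), m.1))).2
      = ((ps.foldl (pvBest (fun p => (PySem.Str.count p.2 v : Int))) st).map (·.1)).getD (-1) := by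
  intro ps
  induction ps with
  | nil => intro st; cases st <;> simp
  | cons p ps ih =>
      intro st
      cases st with
      | none =>
          simpa [pvBest] using ih (some p)
      | some m =>
          simp only [List.foldl_cons, pvBest]
          by_cases h : PySem.Str.count p.2 v < PySem.Str.count m.2 v
          · rw [if_pos (by exact_mod_cast h), if_pos (by exact_mod_cast h)]
            exact ih (some p)
          · rw [if_neg (by exact_mod_cast h), if_neg (by exact_mod_cast h)]
            exact ih (some m)

-- head? of insertBy (strict-< comparator) is the pvBest step of the old head
theorem pvHead_insertBy (key : Int × String → Int) (x : Int × String) (ys : List (Int × String)) :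
    (PySem.List.insertBy (fun a b => decide (key a < key b)) x ys).head?
      = pvBest key ys.head? x := by
  cases ys with
  | nil => simp [PySem.List.insertBy, pvBest]
  | cons y ys =>
      show (if decide (key x < key y) = true then x :: y :: ys
            else y :: PySem.List.insertBy (fun a b => decide (key a < key b)) x ys).head?
           = pvBest key (y :: ys).head? x
      by_cases h : key x < key y <;> simp [h, pvBest]

-- head? of the insertion-sort fold is the pvBest fold
theorem pvHead_foldl_insertBy (key : Int × String → Int) :
    ∀ (ps : List (Int × String)) (acc : List (Int × String)),
      (ps.foldl (fun acc x => PySem.List.insertBy (fun a b => decide (key a < key b)) x acc) acc).head?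
        = ps.foldl (pvBest key) acc.head? := by
  intro ps
  induction ps with
  | nil => intro acc; rfl
  | cons p ps ih =>
      intro acc
      simp only [List.foldl_cons]
      rw [ih, pvHead_insertBy]

-- ===== VERDICT (by name: the statement is the Claim_ definition above) =====
theorem get_layer_by_count_spec : Claim_equal_get_layer_by_count := by
  intro lst val _
  unfold Spec_get_layer_by_count get_layer_by_count get_layer_by_count_alt
  simp only []
  rw [pvAfold_eq_best (PySem.Int.toStr val) (PySem.List.enumerate lst) none]
  rw [PySem.List.sorted_eq_foldl_insertBy]
  have hB := pvHead_foldl_insertBy (fun p => (PySem.Str.count p.2 (PySem.Int.toStr val) : Int))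
      (PySem.List.enumerate lst) []
  cases hsort : (PySem.List.enumerate lst).foldl
      (fun acc x => PySem.List.insertBy
        (fun a b => decide ((PySem.Str.count a.2 (PySem.Int.toStr val) : Int)
                          < (PySem.Str.count b.2 (PySem.Int.toStr val) : Int))) x acc) [] with
  | nil =>
      rw [hsort] at hB
      simp only [List.head?_nil] at hB
      rw [← hB]
      rfl
  | cons q qs =>
      rw [hsort] at hB
      simp only [List.head?_cons, List.head?_nil] at hB
      rw [← hB]
      rfl
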